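-- pv_equiv track=rewrite | github.com/David-TMP/advent_of_code_2024 | day15/day15.py | find_walls
-- ===== SOURCE A (Python) =====
-- def find_walls(sub_grid, move):
--     if move == '<' or move == '^':
--         for i in reversed(range(len(sub_grid))):
--             if sub_grid[i] == ".":
--                 if move == "<":
--                     return i
--                 elif move == "^":
--                     return abs(i-len(sub_grid))
--             elif sub_grid[i] == "#":
--                 return -1
--     else:
--         for x, element in enumerate(sub_grid):
--             if element == ".":
--                 return x
--             elif element == "#":
--                 return -1
-- ===== SOURCE B (Python) =====
-- def find_walls(sub_grid, move):
--     # Orient the scan: '<' and '^' scan from the far end, so reverse once.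
--     if move == '<' or move == '^':
--         seq = sub_grid[::-1]
--     else:
--         seq = sub_grid
--     try:
--         d = seq.index('.')
--     except ValueError:
--         d = None
--     try:
--         w = seq.index('#')
--     except ValueError:
--         w = None
--     if d is None and w is None:
--         return None
--     if w is not None and (d is None or w < d):
--         return -1
--     if move == '<':
--         return len(sub_grid) - 1 - d
--     elif move == '^':
--         return d + 1
--     else:
--         return d
-- ===== Notes on version B (the rewrite author's own statement) =====
-- stated objective: alternative
-- what changed: A does a single early-exit scan in the chosen direction with per-direction index arithmetic inside the loop; B reverses the list once for '<'/'^', locates the first '.' and first '#' with index(), compares the two positions to decide wall-vs-free, and maps the oriented index back at the end.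
-- outside the precondition, e.g. on find_walls(['O'], '>'): A returns None, B returns None
import Mathlib
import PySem

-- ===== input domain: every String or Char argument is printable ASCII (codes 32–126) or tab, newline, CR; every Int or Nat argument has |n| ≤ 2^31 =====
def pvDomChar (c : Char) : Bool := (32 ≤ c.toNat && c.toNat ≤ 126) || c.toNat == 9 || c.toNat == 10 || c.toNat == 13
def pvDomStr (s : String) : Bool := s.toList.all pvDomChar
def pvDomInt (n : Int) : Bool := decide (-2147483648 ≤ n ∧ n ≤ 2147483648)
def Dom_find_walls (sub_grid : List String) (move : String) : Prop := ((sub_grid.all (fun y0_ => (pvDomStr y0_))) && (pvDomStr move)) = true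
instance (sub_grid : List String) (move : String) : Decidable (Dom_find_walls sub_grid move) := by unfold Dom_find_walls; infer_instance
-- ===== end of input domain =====

-- B re-decomposes A's single early-exit directional scan into: orient the list once
-- (reverse for '<'/'^'), find the first '.' and first '#' with index?, compare, then map
-- the oriented index back; objective: alternative decomposition, same cost.

-- ===== PORT A =====
-- loop `for i in reversed(range(len(sub_grid)))`; n is len(sub_grid) (constant during the
-- loop); every i in the index list is < sub_grid.length, so getD never hits its default.
def findWallsRev (sub_grid : List String) (n : Int) (move : String) : List Nat → Option Int
  | [] => none
  | i :: rest =>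
    if sub_grid.getD i "" = "." then
      if move = "<" then some (i : Int)
      else if move = "^" then some (((i : Int) - n).natAbs : Int)
      else findWallsRev sub_grid n move rest
    else if sub_grid.getD i "" = "#" then some (-1)
    else findWallsRev sub_grid n move rest

-- loop `for x, element in enumerate(sub_grid)`
def findWallsFwd : List (Int × String) → Option Int
  | [] => none
  | (x, element) :: rest =>
    if element = "." then some x
    else if element = "#" then some (-1)
    else findWallsFwd rest

-- Python returns None when the loop finds neither '.' nor '#'; that is outside
-- Pre_find_walls and this port returns -2 there.
def find_walls (sub_grid : List String) (move : String) : Int :=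
  (if move = "<" ∨ move = "^" then
    findWallsRev sub_grid (sub_grid.length : Int) move (List.range sub_grid.length).reverse
  else
    findWallsFwd (PySem.List.enumerate sub_grid 0)).getD (-2)

-- ===== PORT B =====
-- `if move=='<': return len-1-d  elif move=='^': return d+1  else: return d`
def fwMapBack (sub_grid : List String) (move : String) (d : Nat) : Int :=
  if move = "<" then (sub_grid.length : Int) - 1 - (d : Int)
  else if move = "^" then (d : Int) + 1
  else (d : Int)

-- Python B returns None when both index calls fail; outside Pre_find_walls, -3 here.
def find_walls_alt (sub_grid : List String) (move : String) : Int :=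
  let seq := if move = "<" ∨ move = "^" then sub_grid.reverse else sub_grid
  match PySem.List.index? seq ".", PySem.List.index? seq "#" with
  | none, none => -3
  | none, some _ => -1
  | some d, some w => if w < d then -1 else fwMapBack sub_grid move d
  | some d, none => fwMapBack sub_grid move d

-- ===== PRECONDITION & SPEC =====
-- Pre_ excludes exactly the inputs on which Python A falls off its loop and returns None
-- (no "." and no "#" element), which is not an int.
def Pre_find_walls (sub_grid : List String) (move : String) : Prop :=
  "." ∈ sub_grid ∨ "#" ∈ sub_grid
instance (sub_grid : List String) (move : String) : Decidable (Pre_find_walls sub_grid move) := by unfold Pre_find_walls; infer_instance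

def pvWitness_find_walls : List String × String := (["O", "."], "<")

def Spec_find_walls (sub_grid : List String) (move : String) (out : Int) : Prop := out = find_walls_alt sub_grid move
instance (sub_grid : List String) (move : String) (out : Int) : Decidable (Spec_find_walls sub_grid move out) := by unfold Spec_find_walls; infer_instance

-- ===== CLAIM (what is proved, stated in full; the proofs are below) =====
def Claim_equal_find_walls : Prop := ∀ (sub_grid : List String) (move : String), Dom_find_walls sub_grid move → Pre_find_walls sub_grid move → Spec_find_walls sub_grid move (find_walls sub_grid move)

-- ===== LEMMAS AND PROOFS =====

-- first element of l that is "." or "#", as (isDot, position)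
def firstHit : List String → Option (Bool × Nat)
  | [] => none
  | e :: rest =>
    if e = "." then some (true, 0)
    else if e = "#" then some (false, 0)
    else (firstHit rest).map (fun p => (p.1, p.2 + 1))

theorem firstHit_eq (l : List String) :
    firstHit l =
      match PySem.List.index? l ".", PySem.List.index? l "#" with
      | none, none => none
      | some d, none => some (true, d)
      | none, some w => some (false, w)
      | some d, some w =>
          if d < w then some (true, d) else if w < d then some (false, w) else none := by
  induction l with
  | nil => simp [firstHit, PySem.List.index?]
  | cons e rest ih =>
    by_cases h1 : e = "."
    · subst h1
      rw [show firstHit ("." :: rest) = some (true, 0) from rfl,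
        PySem.List.index?_cons_self .., PySem.List.index?_cons_of_ne rest (by decide : ("." : String) ≠ "#")]
      cases PySem.List.index? rest "#" <;> simp
    · by_cases h2 : e = "#"
      · subst h2
        rw [show firstHit ("#" :: rest) = some (false, 0) from rfl,
          PySem.List.index?_cons_self .., PySem.List.index?_cons_of_ne rest (by decide : ("#" : String) ≠ ".")]
        cases PySem.List.index? rest "." <;> simp
      · rw [show firstHit (e :: rest) = (firstHit rest).map (fun p => (p.1, p.2 + 1)) by
            simp [firstHit, h1, h2],
          PySem.List.index?_cons_of_ne rest h1,
          PySem.List.index?_cons_of_ne rest h2, ih]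
        cases hd : PySem.List.index? rest "." with
        | none => cases hw : PySem.List.index? rest "#" <;> simp
        | some d =>
          cases hw : PySem.List.index? rest "#" with
          | none => simp
          | some w =>
            by_cases hlt : d < w
            · simp [hlt, (by omega : d + 1 < w + 1)]
            · by_cases hgt : w < d
              · simp [hlt, hgt, (by omega : w + 1 < d + 1)]
              · simp [hlt, hgt]

theorem index?_ne_same (l : List String) (k : Nat)
    (h1 : PySem.List.index? l "." = some k) (h2 : PySem.List.index? l "#" = some k) : False := by
  obtain ⟨hk, he, -⟩ := PySem.List.getElem_of_index?_eq_some h1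
  obtain ⟨hk2, he2, -⟩ := PySem.List.getElem_of_index?_eq_some h2
  rw [he] at he2
  exact absurd he2 (by decide)

theorem fwd_eq (l : List String) (s : Int) :
    findWallsFwd (PySem.List.enumerate l s) =
      (firstHit l).map (fun p => if p.1 then s + (p.2 : Int) else -1) := by
  induction l generalizing s with
  | nil => rfl
  | cons e rest ih =>
    rw [PySem.List.enumerate_cons]
    by_cases h1 : e = "."
    · simp [findWallsFwd, firstHit, h1]
    · by_cases h2 : e = "#"
      · simp [findWallsFwd, firstHit, h2]
      · rw [show findWallsFwd ((s, e) :: PySem.List.enumerate rest (s + 1))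
              = findWallsFwd (PySem.List.enumerate rest (s + 1)) by
            simp [findWallsFwd, h1, h2],
          ih, show firstHit (e :: rest) = (firstHit rest).map (fun p => (p.1, p.2 + 1)) by
            simp [firstHit, h1, h2]]
        cases firstHit rest with
        | none => rfl
        | some p =>
          rcases p with ⟨b, j⟩
          cases b <;> simp [Int.add_comm, Int.add_left_comm]

-- the loop only looks at indices in its index list, so a last element it never
-- visits can be dropped from the grid (n stays fixed)
theorem findWallsRev_append (g : List String) (a : String) (n : Int) (move : String)
    (idxs : List Nat) (h : ∀ i ∈ idxs, i < g.length) :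
    findWallsRev (g ++ [a]) n move idxs = findWallsRev g n move idxs := by
  induction idxs with
  | nil => rfl
  | cons i rest ih =>
    have hi : i < g.length := h i (List.mem_cons_self ..)
    have hget : (g ++ [a]).getD i "" = g.getD i "" := by
      simp [List.getD, List.getElem?_append_left hi]
    have hrest := ih (fun j hj => h j (List.mem_cons_of_mem _ hj))
    simp only [findWallsRev, hget, hrest]

-- value A returns when it stops at original index i ('<' or '^' only)
def retA (n : Int) (move : String) (i : Nat) : Int :=
  if move = "<" then (i : Int) else (((i : Int) - n).natAbs : Int)

theorem rev_eq (g : List String) (n : Int) (move : String)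
    (hm : move = "<" ∨ move = "^") :
    findWallsRev g n move (List.range g.length).reverse =
      (firstHit g.reverse).map
        (fun p => if p.1 then retA n move (g.length - 1 - p.2) else -1) := by
  induction g using List.reverseRecOn with
  | nil => rfl
  | append_singleton g a ih =>
    rw [show (g ++ [a]).length = g.length + 1 by simp, List.range_succ, List.reverse_append]
    by_cases h1 : a = "."
    · subst h1
      rcases hm with hm | hm <;> subst hm <;>
        simp [findWallsRev, retA, firstHit]
    · by_cases h2 : a = "#"
      · subst h2
        simp [findWallsRev, h1, firstHit]
      · have hskip : findWallsRev (g ++ [a]) n move ([g.length].reverse ++ (List.range g.length).reverse)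
            = findWallsRev (g ++ [a]) n move (List.range g.length).reverse := by
          simp [findWallsRev, h1, h2]
        rw [hskip, findWallsRev_append g a n move _
            (fun i hi => by simpa using List.mem_range.mp (List.mem_reverse.mp hi)), ih]
        rw [show (g ++ [a]).reverse = a :: g.reverse by simp,
          show firstHit (a :: g.reverse) = (firstHit g.reverse).map (fun p => (p.1, p.2 + 1)) by
            simp [firstHit, h1, h2]]
        cases firstHit g.reverse with
        | none => rfl
        | some p =>
          rcases p with ⟨b, j⟩
          cases b
          · rfl
          · simp only [Option.map]
            simp
            congr 1
            omega

theorem mapBack_eq_retA (g : List String) (move : String) (d : Nat)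
    (hm : move = "<" ∨ move = "^") (hd : d < g.length) :
    fwMapBack g move d = retA (g.length : Int) move (g.length - 1 - d) := by
  rcases hm with hm | hm <;> subst hm
  · unfold fwMapBack retA
    rw [if_pos rfl, if_pos rfl]
    omega
  · unfold fwMapBack retA
    rw [if_neg (by decide : ¬ ("^" : String) = "<"), if_pos rfl,
      if_neg (by decide : ¬ ("^" : String) = "<")]
    omega

-- ===== VERDICT (by name: the statement is the Claim_ definition above) =====
theorem find_walls_spec : Claim_equal_find_walls := by
  intro sub_grid move _ hpre
  unfold Spec_find_walls find_walls find_walls_alt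
  by_cases hm : move = "<" ∨ move = "^"
  · simp only [if_pos hm]
    rw [rev_eq sub_grid (sub_grid.length : Int) move hm, firstHit_eq]
    have hpre' : PySem.List.index? sub_grid.reverse "." ≠ none
        ∨ PySem.List.index? sub_grid.reverse "#" ≠ none := by
      rcases hpre with h | h
      · exact Or.inl (by rw [Ne, PySem.List.index?_eq_none_iff]; simpa using h)
      · exact Or.inr (by rw [Ne, PySem.List.index?_eq_none_iff]; simpa using h)
    cases hd : PySem.List.index? sub_grid.reverse "." with
    | none =>
      cases hw : PySem.List.index? sub_grid.reverse "#" with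
      | none => rw [hd, hw] at hpre'; simp at hpre'
      | some w => rfl
    | some d =>
      have hdlen : d < sub_grid.length := by
        obtain ⟨hk, -, -⟩ := PySem.List.getElem_of_index?_eq_some hd
        simpa using hk
      cases hw : PySem.List.index? sub_grid.reverse "#" with
      | none =>
        simp only [Option.map_some, Option.getD_some]
        exact (mapBack_eq_retA sub_grid move d hm hdlen).symm
      | some w =>
        by_cases hlt : d < w
        · simp only [if_pos hlt, Option.map_some, Option.getD_some,
            if_neg (by omega : ¬ w < d)]
          exact (mapBack_eq_retA sub_grid move d hm hdlen).symm
        · have hne : w ≠ d := fun h => index?_ne_same _ d hd (h ▸ hw)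
          have hgt : w < d := by omega
          simp [hlt, hgt]
  · simp only [if_neg hm]
    rw [not_or] at hm
    rw [fwd_eq sub_grid 0, firstHit_eq]
    have hpre' : PySem.List.index? sub_grid "." ≠ none
        ∨ PySem.List.index? sub_grid "#" ≠ none := by
      rcases hpre with h | h
      · exact Or.inl (by rw [Ne, PySem.List.index?_eq_none_iff]; simpa using h)
      · exact Or.inr (by rw [Ne, PySem.List.index?_eq_none_iff]; simpa using h)
    cases hd : PySem.List.index? sub_grid "." with
    | none =>
      cases hw : PySem.List.index? sub_grid "#" with
      | none => rw [hd, hw] at hpre'; simp at hpre'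
      | some w => rfl
    | some d =>
      cases hw : PySem.List.index? sub_grid "#" with
      | none => simp [fwMapBack, hm.1, hm.2]
      | some w =>
        by_cases hlt : d < w
        · have hwd : ¬ w < d := by omega
          simp [hlt, hwd, fwMapBack, hm.1, hm.2]
        · have hne : w ≠ d := fun h => index?_ne_same _ d hd (h ▸ hw)
          have hgt : w < d := by omega
          simp [hlt, hgt]
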